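-- pv_equiv track=rewrite | github.com/phuycke/Project-Euler | Code/problem_34.py | factorions
-- ===== SOURCE A (Python) =====
-- def factorial(number):
--     """Calculate the factorial of a number."""
--
--     if number == 0:
--         return 1
--     else:
--        return number * factorial(int(number-1))
--
-- def factorions(lowerbound, upperbound):
--     """Find the numbers for which the sum of the factorials of the single digits equals the number itself."""
--
--     number = 0
--     found = []
--
--     while number <= upperbound:
--         check = str(number)
--         digits = []
--
--         for digit in check:
--             digits.append(int(digit))
--
--         sum = factorial(int(digits[0]))
--         for i in range(1, len(digits)):
--             sum = sum + factorial((digits[i]))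
--
--
--         if (int(sum) == number) and (number > lowerbound):
--             found.append(number)
--
--         number += 1
--
--     return found
-- ===== SOURCE B (Python) =====
-- def factorions(lowerbound, upperbound):
--     """Find the numbers for which the sum of the factorials of the single digits equals the number itself."""
--     fact = [1, 1, 2, 6, 24, 120, 720, 5040, 40320, 362880]
--     found = []
--     for number in range(upperbound + 1):
--         s = fact[number % 10]
--         n = number // 10
--         while n > 0:
--             s += fact[n % 10]
--             n //= 10
--         if s == number and number > lowerbound:
--             found.append(number)
--     return found
-- ===== Notes on version B (the rewrite author's own statement) =====
-- stated objective: faster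
-- what changed: B replaces A's per-number str() conversion, index-based digit list and recursive factorial of each digit with arithmetic digit extraction (n % 10, n //= 10) and a precomputed 10-entry factorial table.
import Mathlib
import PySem

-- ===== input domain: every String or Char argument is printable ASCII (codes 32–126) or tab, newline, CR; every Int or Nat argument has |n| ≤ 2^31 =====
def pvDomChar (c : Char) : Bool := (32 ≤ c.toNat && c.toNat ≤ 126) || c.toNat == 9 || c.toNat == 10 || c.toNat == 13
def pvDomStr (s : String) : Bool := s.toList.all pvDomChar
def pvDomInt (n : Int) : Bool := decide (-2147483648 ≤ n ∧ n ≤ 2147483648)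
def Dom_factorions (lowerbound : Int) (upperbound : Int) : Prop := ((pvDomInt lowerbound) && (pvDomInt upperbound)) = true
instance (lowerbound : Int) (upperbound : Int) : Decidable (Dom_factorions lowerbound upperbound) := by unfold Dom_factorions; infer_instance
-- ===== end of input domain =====

-- B replaces A's per-number str() conversion and recursive per-digit factorial with arithmetic
-- digit extraction (%10, //10) and a precomputed factorial table; measurably faster by a constant factor.

-- ===== PORT A =====

-- A's recursive factorial; A only ever calls it on digit values 0–9 (on negative arguments the
-- Python recursion never terminates, which is never reached), so the Nat-structural transliteration is exact.
def aFactorial : Nat → Int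
  | 0 => 1
  | (k + 1) => ((k : Int) + 1) * aFactorial k

-- int(digit) for one character of str(number); the character is always a decimal digit, so the
-- ValueError branch (getD fallback) is never taken.
def aDigitVal (c : Char) : Int := (PySem.Int.ofChars? [c]).getD 0

-- one iteration of A's while-loop body
def aBody (lowerbound number : Int) (found : List Int) : List Int :=
  let check := PySem.Int.toStr number
  let digits : List Int := check.toList.map aDigitVal
  -- digits[0] / digits[i]: the index is always in range (str(number) is nonempty, i < len), so pyGetD is exact
  let sum0 := aFactorial (PySem.List.pyGetD digits 0 0).toNat
  let sum := (PySem.List.pyRange 1 (PySem.List.len digits)).foldl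
      (fun s i => s + aFactorial (PySem.List.pyGetD digits i 0).toNat) sum0
  if sum == number && number > lowerbound then found ++ [number] else found

-- A's 'while number <= upperbound' loop
def aLoop (lowerbound upperbound number : Int) (found : List Int) : List Int :=
  if h : number ≤ upperbound then
    aLoop lowerbound upperbound (number + 1) (aBody lowerbound number found)
  else found
termination_by (upperbound + 1 - number).toNat
decreasing_by omega

def factorions (lowerbound : Int) (upperbound : Int) : List Int :=
  aLoop lowerbound upperbound 0 []

-- ===== PORT B =====

-- fact = [1, 1, 2, 6, 24, 120, 720, 5040, 40320, 362880]
def bFactTable : List Int := [1, 1, 2, 6, 24, 120, 720, 5040, 40320, 362880]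

-- B's inner 'while n > 0' loop; fact[n % 10] is always in range 0–9, so pyGetD is exact
def bWhile (n s : Int) : Int :=
  if h : 0 < n then
    bWhile (PySem.Int.floordiv n 10) (s + PySem.List.pyGetD bFactTable (PySem.Int.mod n 10) 0)
  else s
termination_by n.toNat
decreasing_by
  have hn : n = ((n.toNat : Nat) : Int) := (Int.toNat_of_nonneg (le_of_lt h)).symm
  rw [hn, show (10 : Int) = ((10 : Nat) : Int) from rfl, PySem.Int.floordiv_natCast]
  have h2 : n.toNat / 10 < n.toNat := Nat.div_lt_self (by omega) (by omega)
  simp only [Int.toNat_natCast]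
  omega

-- one iteration of B's for-loop body
def bBody (lowerbound : Int) (found : List Int) (number : Int) : List Int :=
  let s := PySem.List.pyGetD bFactTable (PySem.Int.mod number 10) 0
  let n := PySem.Int.floordiv number 10
  let s2 := bWhile n s
  if s2 == number && number > lowerbound then found ++ [number] else found

def factorions_alt (lowerbound : Int) (upperbound : Int) : List Int :=
  (PySem.List.pyRange 0 (upperbound + 1)).foldl (bBody lowerbound) []

-- ===== PRECONDITION & SPEC =====
def Spec_factorions (lowerbound : Int) (upperbound : Int) (out : List Int) : Prop := out = factorions_alt lowerbound upperbound
instance (lowerbound : Int) (upperbound : Int) (out : List Int) : Decidable (Spec_factorions lowerbound upperbound out) := by unfold Spec_factorions; infer_instance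

-- ===== CLAIM (what is proved, stated in full; the proofs are below) =====
def Claim_equal_factorions : Prop := ∀ (lowerbound : Int) (upperbound : Int), Dom_factorions lowerbound upperbound → Spec_factorions lowerbound upperbound (factorions lowerbound upperbound)

-- ===== LEMMAS AND PROOFS =====

-- the common value of both per-number digit-factorial sums
def digitFactSum (n : Nat) : Int :=
  aFactorial (n % 10) + if h : n / 10 = 0 then 0 else digitFactSum (n / 10)
termination_by n
decreasing_by exact Nat.div_lt_self (by omega) (by omega)

-- what A applies to each character of str(number)
def gA (c : Char) : Int := aFactorial (aDigitVal c).toNat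

theorem gA_digitChar (n : Nat) : gA ((n % 10).digitChar) = aFactorial (n % 10) := by
  have h : n % 10 < 10 := Nat.mod_lt _ (by omega)
  set d := n % 10 with hd
  interval_cases d <;> decide

theorem bTable_lookup (n : Nat) :
    PySem.List.pyGetD bFactTable ((n % 10 : Nat) : Int) 0 = aFactorial (n % 10) := by
  have h : n % 10 < 10 := Nat.mod_lt _ (by omega)
  set d := n % 10 with hd
  interval_cases d <;> decide

theorem toDigitsCore_ne_nil (f n : Nat) (l : List Char) (h : 0 < f ∨ l ≠ []) :
    Nat.toDigitsCore 10 f n l ≠ [] := by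
  induction f generalizing n l with
  | zero => simpa [Nat.toDigitsCore] using h.resolve_left (by omega)
  | succ f ih =>
    rw [Nat.toDigitsCore]
    split
    · simp
    · exact ih _ _ (Or.inr (by simp))

theorem toDigitsCore_sum (f n : Nat) (l : List Char) (h : n < f) :
    ((Nat.toDigitsCore 10 f n l).map gA).sum = digitFactSum n + ((l.map gA).sum) := by
  induction f generalizing n l with
  | zero => omega
  | succ f ih =>
    rw [Nat.toDigitsCore]
    split
    · rename_i h0
      rw [digitFactSum]
      simp only [h0, dif_pos, List.map_cons, List.sum_cons, gA_digitChar]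
      ring
    · rename_i h0
      have hlt : n / 10 < f := by
        have := Nat.div_lt_self (show 0 < n by omega) (show 1 < 10 by omega)
        omega
      rw [ih _ _ hlt]
      conv_rhs => rw [digitFactSum]
      simp only [h0, dif_neg, not_false_iff, List.map_cons, List.sum_cons, gA_digitChar]
      ring

theorem aSum_eq (m : Nat) :
    (PySem.List.pyRange 1 (PySem.List.len ((PySem.Int.toStr (m : Int)).toList.map aDigitVal))).foldl
      (fun s i => s + aFactorial (PySem.List.pyGetD ((PySem.Int.toStr (m : Int)).toList.map aDigitVal) i 0).toNat)
      (aFactorial (PySem.List.pyGetD ((PySem.Int.toStr (m : Int)).toList.map aDigitVal) 0 0).toNat)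
    = digitFactSum m := by
  have hne : Nat.toDigits 10 m ≠ [] := toDigitsCore_ne_nil (m + 1) m [] (Or.inl (by omega))
  have core : (List.map gA (Nat.toDigits 10 m)).sum = digitFactSum m := by
    have := toDigitsCore_sum (m + 1) m [] (by omega)
    simpa [Nat.toDigits] using this
  have hchars : (PySem.Int.toStr (m : Int)).toList = Nat.toDigits 10 m := by
    rw [PySem.Int.toList_toStr]; simp [PySem.Int.toChars]
  rw [hchars]
  obtain ⟨x, xs, hx⟩ := List.exists_cons_of_ne_nil hne
  rw [hx]
  rw [PySem.List.foldl_pyRange_pyGetD (List.map aDigitVal (x :: xs)) 0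
        (fun s d => s + aFactorial d.toNat) _ (by omega)]
  simp only [List.map_cons, PySem.List.pyGetD_ofNat', List.getD_cons_zero]
  rw [PySem.List.foldl_add]
  rw [← core, hx]
  have hmap : List.map ((fun (d : Int) => aFactorial d.toNat) ∘ aDigitVal) xs = List.map gA xs :=
    List.map_congr_left (fun c _ => rfl)
  simp only [Int.toNat_one, List.drop_succ_cons, List.drop_zero, List.map_map, hmap,
    List.map_cons, List.sum_cons, gA]

theorem bSum_eq (m : Nat) : ∀ (s : Int),
    bWhile ((m : Nat) : Int) s = s + if m = 0 then 0 else digitFactSum m := by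
  induction m using Nat.strong_induction_on with
  | _ m ih =>
    intro s
    rw [bWhile]
    by_cases hm : m = 0
    · subst hm; simp
    · have hpos : (0 : Int) < (m : Int) := by exact_mod_cast Nat.pos_of_ne_zero hm
      rw [dif_pos hpos]
      have e10 : (10 : Int) = ((10 : Nat) : Int) := by norm_num
      rw [e10, PySem.Int.floordiv_natCast, PySem.Int.mod_natCast, bTable_lookup]
      rw [ih (m / 10) (Nat.div_lt_self (Nat.pos_of_ne_zero hm) (by omega))]
      conv_rhs => rw [digitFactSum]
      by_cases h0 : m / 10 = 0 <;> simp [h0, hm] <;> ring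

theorem body_eq (lb : Int) (m : Nat) (found : List Int) :
    aBody lb (m : Int) found = bBody lb found (m : Int) := by
  have hsum : aFactorial (m % 10) + (if m / 10 = 0 then 0 else digitFactSum (m / 10))
      = digitFactSum m := by
    conv_rhs => rw [digitFactSum]
    by_cases h0 : m / 10 = 0 <;> simp [h0]
  have hb : bBody lb found (m : Int)
      = if (digitFactSum m == (m : Int) && decide (lb < (m : Int))) then found ++ [(m : Int)] else found := by
    simp only [bBody]
    rw [show (10 : Int) = ((10 : Nat) : Int) from rfl, PySem.Int.mod_natCast,
      PySem.Int.floordiv_natCast, bTable_lookup, bSum_eq, hsum]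
  have ha : aBody lb (m : Int) found
      = if (digitFactSum m == (m : Int) && decide (lb < (m : Int))) then found ++ [(m : Int)] else found := by
    simp only [aBody]
    rw [aSum_eq]
  rw [ha, hb]

theorem loop_eq (lb ub : Int) (j : Nat) : ∀ (k : Nat) (found : List Int),
    (ub + 1 - (k : Int)).toNat ≤ j →
    aLoop lb ub (k : Int) found = (PySem.List.pyRange (k : Int) (ub + 1)).foldl (bBody lb) found := by
  induction j with
  | zero =>
    intro k found hj
    have hk : ¬ ((k : Int) ≤ ub) := by omega
    rw [aLoop, dif_neg hk]
    have hemp : PySem.List.pyRange (k : Int) (ub + 1) = [] := by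
      rw [PySem.List.pyRange_one]
      have h0 : (ub + 1 - (k : Int)).toNat = 0 := by omega
      simp [h0]
    rw [hemp, List.foldl_nil]
  | succ j ih =>
    intro k found hj
    by_cases hk : (k : Int) ≤ ub
    · rw [aLoop, dif_pos hk, PySem.List.pyRange_one_cons (by omega), List.foldl_cons, ← body_eq]
      have hcast : ((k : Int) + 1) = (((k + 1 : Nat)) : Int) := by push_cast; ring
      rw [hcast]
      exact ih (k + 1) _ (by omega)
    · rw [aLoop, dif_neg hk]
      have hemp : PySem.List.pyRange (k : Int) (ub + 1) = [] := by
        rw [PySem.List.pyRange_one]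
        have h0 : (ub + 1 - (k : Int)).toNat = 0 := by omega
        simp [h0]
      rw [hemp, List.foldl_nil]

-- ===== VERDICT (by name: the statement is the Claim_ definition above) =====
theorem factorions_spec : Claim_equal_factorions := by
  intro lb ub _
  unfold Spec_factorions factorions factorions_alt
  have := loop_eq lb ub (ub + 1).toNat 0 [] (by omega)
  simpa using this
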